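-- pv_equiv track=rewrite | github.com/faizan1234567/NewsQA | utils.py | find_questions_indices
-- ===== SOURCE A (Python) =====
-- def find_questions_indices(data):
--   '''
--   find question "?" identifiers index in the list
--
--   parameters
--   ----------
--   data: list
--
--   return:
--   ------
--   first_question_index: int
--   last_question_index: int
--   '''
--   first_question_index = None
--   last_question_index = None
--
--   # Iterate through the list
--   for i, item in enumerate(data):
--       if item.endswith('?') or '?' in item:
--           # If first_question_index is None, set it to the current index
--           if first_question_index is None:
--               first_question_index = i
--           # Update last_question_index to the current index
--           last_question_index = i
--   return (first_question_index, last_question_index)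
-- ===== SOURCE B (Python) =====
-- def find_questions_indices(data):
--     # forward scan for the first match, then a separate reverse scan for the last match
--     first = None
--     for i, item in enumerate(data):
--         if item.endswith('?') or '?' in item:
--             first = i
--             break
--     if first is None:
--         return (None, None)
--     last = first
--     for j, item in reversed(list(enumerate(data))):
--         if item.endswith('?') or '?' in item:
--             last = j
--             break
--     return (first, last)
-- ===== Notes on version B (the rewrite author's own statement) =====
-- stated objective: alternative
-- what changed: Replaces A's single full pass maintaining two scalar indices with two early-breaking scans: a forward scan for the first matching index and a reverse scan for the last.
import Mathlib
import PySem

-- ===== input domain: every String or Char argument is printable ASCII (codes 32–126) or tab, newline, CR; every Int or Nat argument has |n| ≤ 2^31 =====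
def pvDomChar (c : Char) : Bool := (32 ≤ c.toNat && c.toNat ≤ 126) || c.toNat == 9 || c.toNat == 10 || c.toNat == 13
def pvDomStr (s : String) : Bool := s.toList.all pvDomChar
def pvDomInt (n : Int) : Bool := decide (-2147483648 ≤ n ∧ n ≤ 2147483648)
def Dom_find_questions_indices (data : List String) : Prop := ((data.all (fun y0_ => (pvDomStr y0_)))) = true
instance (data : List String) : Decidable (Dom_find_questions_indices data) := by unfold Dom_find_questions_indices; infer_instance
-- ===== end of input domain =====

-- B replaces A's single full pass maintaining two scalars with two early-breaking scans
-- (forward for the first match, reverse for the last); no speed claim (objective: alternative).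

-- the shared test: item.endswith('?') or '?' in item
def pvQCond (s : String) : Bool := PySem.Str.endswith s "?" || PySem.Str.isIn "?" s

-- ===== PORT A =====
-- A: one fold over enumerate(data), updating (first, last)
def find_questions_indices (data : List String) : Option Int × Option Int :=
  (PySem.List.enumerate data).foldl
    (fun st p =>
      if pvQCond p.2 then
        ((match st.1 with | none => some p.1 | some f => some f), some p.1)
      else st)
    (none, none)

-- ===== PORT B =====
-- forward scan with early break: first index whose item matches
def pvFirstMatch : List (Int × String) → Option Int
  | [] => none
  | (i, s) :: rest => if pvQCond s then some i else pvFirstMatch rest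

def find_questions_indices_alt (data : List String) : Option Int × Option Int :=
  match pvFirstMatch (PySem.List.enumerate data) with
  | none => (none, none)
  | some f =>
      (some f, some ((pvFirstMatch (PySem.List.enumerate data).reverse).getD f))

-- ===== PRECONDITION & SPEC =====
def Spec_find_questions_indices (data : List String) (out : Option Int × Option Int) : Prop := out = find_questions_indices_alt data
instance (data : List String) (out : Option Int × Option Int) : Decidable (Spec_find_questions_indices data out) := by unfold Spec_find_questions_indices; infer_instance

-- ===== CLAIM (what is proved, stated in full; the proofs are below) =====
def Claim_equal_find_questions_indices : Prop := ∀ (data : List String), Dom_find_questions_indices data → Spec_find_questions_indices data (find_questions_indices data)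

-- ===== LEMMAS AND PROOFS =====

-- the "last match" fold (A's second component, once the first component is set)
def pvLastFold (e : List (Int × String)) (l : Option Int) : Option Int :=
  e.foldl (fun l p => if pvQCond p.2 then some p.1 else l) l

lemma pvA_fold_some (e : List (Int × String)) (f : Int) (l : Option Int) :
    e.foldl
      (fun st p =>
        if pvQCond p.2 then
          ((match st.1 with | none => some p.1 | some f => some f), some p.1)
        else st)
      (some f, l) = (some f, pvLastFold e l) := by
  induction e generalizing l with
  | nil => rfl
  | cons p rest ih =>
      simp only [pvLastFold, List.foldl_cons]
      by_cases h : pvQCond p.2 = true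
      · simp [h, ih, pvLastFold]
      · simp [h, ih, pvLastFold]

lemma pvA_fold_eq (e : List (Int × String)) :
    e.foldl
      (fun st p =>
        if pvQCond p.2 then
          ((match st.1 with | none => some p.1 | some f => some f), some p.1)
        else st)
      (none, none) = (pvFirstMatch e, pvLastFold e none) := by
  induction e with
  | nil => rfl
  | cons p rest ih =>
      simp only [List.foldl_cons, pvFirstMatch, pvLastFold]
      by_cases h : pvQCond p.2 = true
      · simp [h, pvA_fold_some, pvLastFold]
      · simp [h, ih, pvLastFold]

lemma pvLastFold_eq_firstMatch_reverse (e : List (Int × String)) (l : Option Int) :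
    pvLastFold e l = match pvFirstMatch e.reverse with
                     | some j => some j
                     | none => l := by
  induction e using List.reverseRecOn generalizing l with
  | nil => rfl
  | append_singleton e p ih =>
      simp only [pvLastFold, List.foldl_append, List.foldl_cons, List.foldl_nil,
        List.reverse_append, List.reverse_cons, List.reverse_nil, List.nil_append,
        List.cons_append, pvFirstMatch]
      by_cases h : pvQCond p.2 = true
      · simp [h]
      · simpa [h, pvLastFold] using ih l

lemma pvFirstMatch_none_iff (e : List (Int × String)) :
    pvFirstMatch e = none ↔ ∀ p ∈ e, pvQCond p.2 = false := by
  induction e with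
  | nil => simp [pvFirstMatch]
  | cons p rest ih =>
      by_cases h : pvQCond p.2 = true
      · simp [pvFirstMatch, h]
      · simp [pvFirstMatch, h, ih]

lemma pvFirstMatch_reverse_none_iff (e : List (Int × String)) :
    pvFirstMatch e.reverse = none ↔ pvFirstMatch e = none := by
  simp [pvFirstMatch_none_iff]

-- ===== VERDICT (by name: the statement is the Claim_ definition above) =====
theorem find_questions_indices_spec : Claim_equal_find_questions_indices := by
  intro data _
  unfold Spec_find_questions_indices find_questions_indices find_questions_indices_alt
  rw [pvA_fold_eq, pvLastFold_eq_firstMatch_reverse]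
  cases hf : pvFirstMatch (PySem.List.enumerate data) with
  | none =>
      rw [(pvFirstMatch_reverse_none_iff _).mpr hf]
  | some f =>
      cases hr : pvFirstMatch (PySem.List.enumerate data).reverse with
      | none =>
          rw [(pvFirstMatch_reverse_none_iff _).mp hr] at hf
          exact absurd hf (by simp)
      | some j => simp
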